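-- pv_equiv track=rewrite | github.com/MrBrantCode/unitest_baseline | mut_generate/mist_train_cf/cf_80500/solution.py | heaviest_combination
-- ===== SOURCE A (Python) =====
-- def heaviest_combination(objects, weights, limit):
--     """
--     Returns the combination of objects that results in the heaviest weight without exceeding the given limit.
--
--     Args:
--         objects (list): A list of object names.
--         weights (list): A list of corresponding object weights.
--         limit (float): A weight limit.
--
--     Returns:
--         list: The heaviest combination of objects within the limit.
--     """
--     # Initialize variables to remember the best combination
--     best_weight = 0
--     best_combination = []
--
--     # Try all combinations
--     for i in range(2**len(objects)):
--         # Initialize variables for this combination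
--         combination = []
--         weight = 0
--
--         # Try adding each object
--         for j in range(len(objects)):
--             # If the jth bit of i is 1, add the object
--             if (i >> j) & 1:
--                 combination.append(objects[j])
--                 weight += weights[j]
--
--         # If this combination is heavier but not too heavy, remember it
--         if weight > best_weight and weight <= limit:
--             best_weight = weight
--             best_combination = combination
--
--     return best_combination
-- ===== SOURCE B (Python) =====
-- def heaviest_combination(objects, weights, limit):
--     # Build (weight, mask) for every subset by iterative doubling, then one scan
--     # picks the first strictly-improving weight within the limit; decode the mask.
--     pairs = [(0, 0)]
--     for j in range(len(objects)):
--         w = weights[j]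
--         bit = 1 << j
--         pairs += [(wt + w, m | bit) for (wt, m) in pairs]
--
--     best_weight = 0
--     best_mask = 0
--     for wt, m in pairs:
--         if wt > best_weight and wt <= limit:
--             best_weight = wt
--             best_mask = m
--
--     return [objects[j] for j in range(len(objects)) if (best_mask >> j) & 1]
-- ===== Notes on version B (the rewrite author's own statement) =====
-- stated objective: alternative
-- what changed: Instead of re-scanning all n bits of every mask to rebuild each subset from scratch, B builds one (weight, mask) pair per subset by iterative doubling with incremental weights, picks the best in a single scan, and decodes only the winning mask once at the end.
import Mathlib
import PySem

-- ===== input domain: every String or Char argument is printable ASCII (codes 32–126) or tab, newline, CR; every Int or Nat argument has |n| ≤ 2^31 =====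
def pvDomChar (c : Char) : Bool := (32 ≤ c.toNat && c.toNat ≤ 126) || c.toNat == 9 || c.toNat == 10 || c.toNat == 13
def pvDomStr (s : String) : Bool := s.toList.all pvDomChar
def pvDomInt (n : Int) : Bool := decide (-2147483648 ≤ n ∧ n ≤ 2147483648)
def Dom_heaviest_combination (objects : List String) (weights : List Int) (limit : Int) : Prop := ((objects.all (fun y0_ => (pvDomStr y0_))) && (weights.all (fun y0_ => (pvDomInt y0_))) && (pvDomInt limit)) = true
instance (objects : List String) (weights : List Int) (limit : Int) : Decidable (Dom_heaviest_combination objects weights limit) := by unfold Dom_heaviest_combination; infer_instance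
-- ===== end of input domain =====

-- B replaces A's per-mask bit rescan by iterative subset doubling with incremental
-- weights (one (weight, mask) pair per subset), a single selection scan, and one final
-- mask decode.

-- ===== PORT A =====
def heaviest_combination (objects : List String) (weights : List Int) (limit : Int) : List String :=
  ((PySem.List.pyRange 0 ((2 ^ objects.length : Nat) : Int) 1).foldl
    (fun (best : Int × List String) i =>
      let cw := (PySem.List.pyRange 0 (objects.length : Int) 1).foldl
        (fun (cw : List String × Int) j =>
          if PySem.Int.band (i >>> j.toNat) 1 ≠ 0 then
            (cw.1 ++ [PySem.List.pyGetD objects j ""], cw.2 + PySem.List.pyGetD weights j 0)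
          else cw)
        (([] : List String), (0 : Int))
      if cw.2 > best.1 ∧ cw.2 ≤ limit then (cw.2, cw.1) else best)
    ((0 : Int), ([] : List String))).2

-- ===== PORT B =====
def heaviest_combination_alt (objects : List String) (weights : List Int) (limit : Int) : List String :=
  let pairs := (PySem.List.pyRange 0 (objects.length : Int) 1).foldl
    (fun (pairs : List (Int × Int)) j =>
      let w := PySem.List.pyGetD weights j 0
      let bit : Int := (1 : Int) <<< j.toNat
      pairs ++ pairs.map (fun p => (p.1 + w, PySem.Int.bor p.2 bit)))
    [((0 : Int), (0 : Int))]
  let best := pairs.foldl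
    (fun (b : Int × Int) p => if p.1 > b.1 ∧ p.1 ≤ limit then p else b) ((0 : Int), (0 : Int))
  ((PySem.List.pyRange 0 (objects.length : Int) 1).filter
      (fun j => PySem.Int.band (best.2 >>> j.toNat) 1 != 0)).map
    (fun j => PySem.List.pyGetD objects j "")

-- ===== PRECONDITION & SPEC =====
-- Pre_ excludes exactly the inputs where Python A raises IndexError: fewer weights than objects.
def Pre_heaviest_combination (objects : List String) (weights : List Int) (limit : Int) : Prop :=
  objects.length ≤ weights.length
instance (objects : List String) (weights : List Int) (limit : Int) : Decidable (Pre_heaviest_combination objects weights limit) := by unfold Pre_heaviest_combination; infer_instance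
def pvWitness_heaviest_combination : List String × List Int × Int := (["a", "b"], [1, 2], 2)

def Spec_heaviest_combination (objects : List String) (weights : List Int) (limit : Int) (out : List String) : Prop := out = heaviest_combination_alt objects weights limit
instance (objects : List String) (weights : List Int) (limit : Int) (out : List String) : Decidable (Spec_heaviest_combination objects weights limit out) := by unfold Spec_heaviest_combination; infer_instance

-- ===== CLAIM (what is proved, stated in full; the proofs are below) =====
def Claim_equal_heaviest_combination : Prop := ∀ (objects : List String) (weights : List Int) (limit : Int), Dom_heaviest_combination objects weights limit → Pre_heaviest_combination objects weights limit → Spec_heaviest_combination objects weights limit (heaviest_combination objects weights limit)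

-- ===== LEMMAS AND PROOFS =====

-- (comb, weight) of the subset of the first k objects selected by the bits of mask m,
-- in the object order both programs use.
def cwMask (objects : List String) (weights : List Int) : Nat → Nat → List String × Int
  | 0, _ => ([], 0)
  | k+1, m =>
    let p := cwMask objects weights k m
    if m.testBit k then (p.1 ++ [objects.getD k ""], p.2 + weights.getD k 0) else p

lemma bit_bool (m j : Nat) :
    (PySem.Int.band ((m : Int) >>> ((j : Nat) : Int)) 1 != 0) = m.testBit j := by
  have h1 : ((m:Int) >>> ((j : Nat) : Int)) = ((m >>> j : Nat) : Int) := by simp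
  rw [h1]
  have h2 : PySem.Int.band ((m >>> j : Nat) : Int) 1 = (((m >>> j) &&& 1 : Nat) : Int) := by
    exact_mod_cast PySem.Int.band_natCast (m >>> j) 1
  rw [h2]
  rcases Nat.mod_two_eq_zero_or_one (m >>> j) with h | h <;>
    simp [Nat.testBit, Nat.and_one_is_mod, h]

lemma bit_prop' (m j : Nat) :
    (PySem.Int.band ((m : Int) >>> (j : Nat)) 1 ≠ 0) ↔ m.testBit j = true := by
  have h1 : ((m : Int) >>> (j : Nat)) = ((m >>> j : Nat) : Int) := by simp
  rw [h1]
  have h2 : PySem.Int.band ((m >>> j : Nat) : Int) 1 = (((m >>> j) &&& 1 : Nat) : Int) := by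
    exact_mod_cast PySem.Int.band_natCast (m >>> j) 1
  rw [h2]
  rcases Nat.mod_two_eq_zero_or_one (m >>> j) with h | h <;>
    simp [Nat.testBit, Nat.and_one_is_mod, h]

lemma cwMask_zero (objects : List String) (weights : List Int) (k : Nat) :
    cwMask objects weights k 0 = ([], 0) := by
  induction k with
  | zero => rfl
  | succ k ih => simp [cwMask, Nat.zero_testBit, ih]

lemma cwMask_congr (objects : List String) (weights : List Int) (k : Nat) (m m' : Nat)
    (h : ∀ j, j < k → m.testBit j = m'.testBit j) :
    cwMask objects weights k m = cwMask objects weights k m' := by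
  induction k with
  | zero => rfl
  | succ k ih =>
    simp only [cwMask]
    rw [ih (fun j hj => h j (by omega)), h k (by omega)]

lemma cwMask_lt (objects : List String) (weights : List Int) (k m : Nat) (h : m < 2 ^ k) :
    cwMask objects weights (k+1) m = cwMask objects weights k m := by
  simp [cwMask, Nat.testBit_lt_two_pow h]

lemma cwMask_add (objects : List String) (weights : List Int) (k m : Nat) (h : m < 2 ^ k) :
    cwMask objects weights (k+1) (2 ^ k + m) =
      ((cwMask objects weights k m).1 ++ [objects.getD k ""],
       (cwMask objects weights k m).2 + weights.getD k 0) := by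
  have hcongr := cwMask_congr objects weights k (2 ^ k + m) m
    (fun j hj => Nat.testBit_two_pow_add_gt hj m)
  simp [cwMask, Nat.testBit_two_pow_add_eq, Nat.testBit_lt_two_pow h, hcongr]

-- A's inner loop over a mask m computes cwMask.
lemma innerA_eq (objects : List String) (weights : List Int) (m : Nat) :
    (PySem.List.pyRange 0 (objects.length : Int) 1).foldl
      (fun (cw : List String × Int) j =>
        if PySem.Int.band
            (@HShiftRight.hShiftRight Int Nat Int Int.instHShiftRightNat ((m : Nat) : Int) j.toNat) 1 ≠ 0 then
          (cw.1 ++ [PySem.List.pyGetD objects j ""], cw.2 + PySem.List.pyGetD weights j 0)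
        else cw)
      ([], 0)
    = cwMask objects weights objects.length m := by
  rw [PySem.List.pyRange_zero_nat, List.foldl_map]
  have key : ∀ k : Nat,
      (List.range k).foldl
        (fun (cw : List String × Int) (j : Nat) =>
          if PySem.Int.band
              (@HShiftRight.hShiftRight Int Nat Int Int.instHShiftRightNat ((m : Nat) : Int)
                ((j : Int)).toNat) 1 ≠ 0 then
            (cw.1 ++ [PySem.List.pyGetD objects (j : Int) ""],
             cw.2 + PySem.List.pyGetD weights (j : Int) 0)
          else cw)
        ([], 0)
      = cwMask objects weights k m := by
    intro k
    induction k with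
    | zero => rfl
    | succ k ih =>
      rw [List.range_succ, List.foldl_append, ih]
      by_cases hb : m.testBit k <;>
        simp [cwMask, bit_prop', PySem.List.pyGetD_natCast, hb]
  exact key objects.length

-- B's doubling loop builds exactly one (weight, mask) pair per mask, in mask order.
lemma pairs_eq (objects : List String) (weights : List Int) :
    (PySem.List.pyRange 0 (objects.length : Int) 1).foldl
      (fun (pairs : List (Int × Int)) j =>
        pairs ++ pairs.map (fun p =>
          (p.1 + PySem.List.pyGetD weights j 0, PySem.Int.bor p.2 ((1 : Int) <<< j.toNat))))
      [((0 : Int), (0 : Int))]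
    = (List.range (2 ^ objects.length)).map
        (fun m => ((cwMask objects weights objects.length m).2, (m : Int))) := by
  rw [PySem.List.pyRange_zero_nat, List.foldl_map]
  have key : ∀ k : Nat,
      (List.range k).foldl
        (fun (pairs : List (Int × Int)) (j : Nat) =>
          pairs ++ pairs.map (fun p =>
            (p.1 + PySem.List.pyGetD weights (j : Int) 0,
             PySem.Int.bor p.2 ((1 : Int) <<< (((j : Int)).toNat : Nat)))))
        [((0 : Int), (0 : Int))]
      = (List.range (2 ^ k)).map
          (fun m => ((cwMask objects weights k m).2, (m : Int))) := by
    intro k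
    induction k with
    | zero => simp [cwMask]
    | succ k ih =>
      rw [List.range_succ, List.foldl_append, ih]
      simp only [List.foldl_cons, List.foldl_nil]
      have h2 : 2 ^ (k + 1) = 2 ^ k + 2 ^ k := by ring
      rw [h2, List.range_add, List.map_append, List.map_map, List.map_map]
      congr 1
      · refine List.map_congr_left (fun m hm => ?_)
        rw [List.mem_range] at hm
        rw [cwMask_lt objects weights k m hm]
      · refine List.map_congr_left (fun m hm => ?_)
        rw [List.mem_range] at hm
        have hor : PySem.Int.bor (m : Int) ((2 ^ k : Nat) : Int) = ((2 ^ k + m : Nat) : Int) := by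
          rw [PySem.Int.bor_natCast]
          have := Nat.two_pow_add_eq_or_of_lt hm 1
          simp only [mul_one] at this
          rw [Nat.lor_comm, ← this]
        have hbit' : (1 : Int) <<< (k : Nat) = (2 : Int) ^ k := by
          rw [Int.shiftLeft_eq, one_mul]
        have hor' : PySem.Int.bor (m : Int) ((2 : Int) ^ k) = 2 ^ k + (m : Int) := by
          have h := hor; push_cast at h; exact h
        simp [Int.toNat_natCast, PySem.List.pyGetD_natCast, hbit', hor',
          cwMask_add objects weights k m hm]
  exact key objects.length

-- B's final comprehension decodes a mask back to its combination.
lemma recon_eq (objects : List String) (weights : List Int) (m : Nat) :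
    ((PySem.List.pyRange 0 (objects.length : Int) 1).filter
        (fun j => PySem.Int.band ((m : Int) >>> j.toNat) 1 != 0)).map
      (fun j => PySem.List.pyGetD objects j "")
    = (cwMask objects weights objects.length m).1 := by
  rw [PySem.List.pyRange_zero_nat, List.filter_map, List.map_map]
  have hp : ((fun j => PySem.Int.band ((m : Int) >>> j.toNat) 1 != 0) ∘ (fun k : Nat => (k : Int)))
      = fun j : Nat => m.testBit j := by
    funext j
    simp only [Function.comp_apply, Int.toNat_natCast]
    exact bit_bool m j
  rw [hp]
  have key : ∀ k : Nat,
      ((List.range k).filter (fun j => m.testBit j)).map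
        (fun j => PySem.List.pyGetD objects ((j : Nat) : Int) "")
      = (cwMask objects weights k m).1 := by
    intro k
    induction k with
    | zero => rfl
    | succ k ih =>
      rw [List.range_succ, List.filter_append, List.map_append, ih]
      by_cases hb : m.testBit k <;>
        simp [cwMask, hb, PySem.List.pyGetD_natCast]
  rw [← key objects.length]
  rfl

-- The two selection folds stay in lock step.
lemma selB_eq (limit : Int) (n : Nat) (objects : List String) (weights : List Int)
    (l : List Nat) (bw : Int) (bm : Nat) :
    (l.map (fun m => ((cwMask objects weights n m).2, (m : Int)))).foldl
      (fun (b : Int × Int) p => if p.1 > b.1 ∧ p.1 ≤ limit then p else b) (bw, (bm : Int))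
    = (((l.foldl (fun (b : Int × Nat) m =>
          if (cwMask objects weights n m).2 > b.1 ∧ (cwMask objects weights n m).2 ≤ limit
          then ((cwMask objects weights n m).2, m) else b) (bw, bm)).1 : Int),
       (((l.foldl (fun (b : Int × Nat) m =>
          if (cwMask objects weights n m).2 > b.1 ∧ (cwMask objects weights n m).2 ≤ limit
          then ((cwMask objects weights n m).2, m) else b) (bw, bm)).2 : Nat) : Int)) := by
  induction l generalizing bw bm with
  | nil => rfl
  | cons x l ih =>
    simp only [List.map_cons, List.foldl_cons]
    by_cases hc : (cwMask objects weights n x).2 > bw ∧ (cwMask objects weights n x).2 ≤ limit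
    · rw [if_pos hc, if_pos hc]
      exact ih ((cwMask objects weights n x).2) x
    · rw [if_neg hc, if_neg hc]
      exact ih bw bm

lemma selA_eq (limit : Int) (n : Nat) (objects : List String) (weights : List Int)
    (l : List Nat) (bw : Int) (bm : Nat) :
    l.foldl
      (fun (best : Int × List String) m =>
        if (cwMask objects weights n m).2 > best.1 ∧ (cwMask objects weights n m).2 ≤ limit
        then ((cwMask objects weights n m).2, (cwMask objects weights n m).1) else best)
      (bw, (cwMask objects weights n bm).1)
    = ((l.foldl (fun (b : Int × Nat) m =>
          if (cwMask objects weights n m).2 > b.1 ∧ (cwMask objects weights n m).2 ≤ limit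
          then ((cwMask objects weights n m).2, m) else b) (bw, bm)).1,
       (cwMask objects weights n
         ((l.foldl (fun (b : Int × Nat) m =>
          if (cwMask objects weights n m).2 > b.1 ∧ (cwMask objects weights n m).2 ≤ limit
          then ((cwMask objects weights n m).2, m) else b) (bw, bm)).2)).1) := by
  induction l generalizing bw bm with
  | nil => rfl
  | cons x l ih =>
    simp only [List.foldl_cons]
    by_cases hc : (cwMask objects weights n x).2 > bw ∧ (cwMask objects weights n x).2 ≤ limit
    · rw [if_pos hc, if_pos hc]
      exact ih ((cwMask objects weights n x).2) x
    · rw [if_neg hc, if_neg hc]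
      exact ih bw bm

-- ===== VERDICT (by name: the statement is the Claim_ definition above) =====
theorem heaviest_combination_spec : Claim_equal_heaviest_combination := by
  intro objects weights limit _ _
  unfold Spec_heaviest_combination heaviest_combination heaviest_combination_alt
  rw [pairs_eq objects weights]
  rw [PySem.List.pyRange_zero_nat (2 ^ objects.length), List.foldl_map]
  simp only [innerA_eq]
  rw [show ((0 : Int), ([] : List String))
      = ((0 : Int), (cwMask objects weights objects.length 0).1) from by rw [cwMask_zero]]
  rw [selA_eq limit objects.length objects weights]
  rw [show ((0 : Int), (0 : Int)) = ((0 : Int), ((0 : Nat) : Int)) from rfl]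
  rw [selB_eq limit objects.length objects weights]
  simp only [recon_eq objects weights]
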